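-- pv_equiv track=rewrite | github.com/chintanagrawal97/hiveBee | api/hiveHelper.py | get_specific_warnings
-- ===== SOURCE A (Python) =====
-- def get_specific_warnings(JsonRes):
--
--     keywords_sp_error= [ "METASTORE_FILTER_HOOK will be ignored",
--     "Hive-on-MR is deprecated in Hive 2 and may not be available in the future versions",
--     "Group org.apache.hadoop.mapred.Task$Counter is deprecated"];
--
--     SPECIFIC_ERROR_L = []
--
--     Jsonlength=len(JsonRes)
--     for SError in keywords_sp_error:
--         SPECIFIC_ERROR = {}
--         SPECIFIC_ERROR[SError]={}
--         for i in range(Jsonlength):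
--             temp=JsonRes[i]
--             ContaineridL=list(temp.keys())
--             ContainerID=ContaineridL[0]
--             value=temp[ContainerID]
--             ErrL=value['WARN']
--             for err in ErrL:
--                 if SError in err:
--                     if ContainerID in SPECIFIC_ERROR[SError]:
--                         SPECIFIC_ERROR[SError][ContainerID].append(err)
--                     else:
--                         SPECIFIC_ERROR[SError][ContainerID]=[]
--                         SPECIFIC_ERROR[SError][ContainerID].append(err)
--
--         if SPECIFIC_ERROR not in SPECIFIC_ERROR_L:
--             SPECIFIC_ERROR_L.append(SPECIFIC_ERROR)
--     return SPECIFIC_ERROR_L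
-- ===== SOURCE B (Python) =====
-- def get_specific_warnings(JsonRes):
--     keywords_sp_error = ["METASTORE_FILTER_HOOK will be ignored",
--         "Hive-on-MR is deprecated in Hive 2 and may not be available in the future versions",
--         "Group org.apache.hadoop.mapred.Task$Counter is deprecated"]
--
--     # stage 1: flatten once into (container_id, warning) pairs
--     pairs = []
--     for temp in JsonRes:
--         cid = next(iter(temp))
--         pairs.extend((cid, err) for err in temp[cid]['WARN'])
--
--     # stage 2: per keyword, filter the flat stream, take the key order as the
--     # deduplicated container order of the matches, then gather each key's
--     # warnings by re-scanning the matches (no incremental dict mutation)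
--     out = []
--     for kw in keywords_sp_error:
--         hits = [(cid, err) for cid, err in pairs if kw in err]
--         cids = list(dict.fromkeys(cid for cid, _ in hits))
--         out.append({kw: {cid: [e for c, e in hits if c == cid] for cid in cids}})
--     return out
-- ===== Notes on version B (the rewrite author's own statement) =====
-- stated objective: alternative
-- what changed: A runs one full pass over the containers per keyword, mutating a dict incrementally (membership test, create-or-append) and finishing with a dict-dedup that is a no-op; B first flattens the containers once into a flat (container_id, warning) stream, then for each keyword filters that stream, takes the deduplicated container order of the matches as the key order, and gathers each key's warnings by re-scanning the matches - a filter/dedup/gather pipeline with no incremental dict updates; B trades the O(1) dict update for a re-scan per distinct container.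
import Mathlib
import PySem

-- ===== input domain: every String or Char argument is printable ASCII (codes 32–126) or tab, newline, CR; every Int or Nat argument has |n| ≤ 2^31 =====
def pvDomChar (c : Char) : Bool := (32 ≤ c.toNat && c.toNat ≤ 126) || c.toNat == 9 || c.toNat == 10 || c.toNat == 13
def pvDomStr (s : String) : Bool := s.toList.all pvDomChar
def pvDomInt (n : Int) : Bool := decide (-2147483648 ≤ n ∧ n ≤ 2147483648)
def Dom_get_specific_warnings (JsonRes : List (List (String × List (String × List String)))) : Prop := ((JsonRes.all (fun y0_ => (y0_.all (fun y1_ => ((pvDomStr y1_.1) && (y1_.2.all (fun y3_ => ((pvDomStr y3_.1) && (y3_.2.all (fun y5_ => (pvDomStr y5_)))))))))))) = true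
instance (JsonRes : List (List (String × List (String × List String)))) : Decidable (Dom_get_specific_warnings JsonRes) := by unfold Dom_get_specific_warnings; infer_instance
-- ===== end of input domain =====

-- B replaces A's per-keyword passes with incremental dict mutation by a staged
-- pipeline: flatten the containers once into a flat (cid, warning) stream, then per
-- keyword filter / dedup-keys / gather; objective: alternative decomposition.

-- ===== PORT A =====
def pvKeywords : List String :=
  ["METASTORE_FILTER_HOOK will be ignored",
   "Hive-on-MR is deprecated in Hive 2 and may not be available in the future versions",
   "Group org.apache.hadoop.mapred.Task$Counter is deprecated"]

-- 'for err in ErrL: if SError in err: …' body of A's innermost loop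
def pvAErrStep (SError ContainerID : String)
    (d : PySem.Dict String (List String)) (err : String) : PySem.Dict String (List String) :=
  if PySem.Str.isIn SError err then
    if d.contains ContainerID then d.modify ContainerID [] (fun l => l ++ [err])
    else PySem.Dict.insert (d.insert ContainerID []) ContainerID ([] ++ [err])
  else d

-- one iteration of A's 'for i in range(Jsonlength)' body, acting on SPECIFIC_ERROR[SError];
-- the 'none' arms are Python's IndexError / KeyError, excluded by Pre_
def pvAContainer (SError : String) (d : PySem.Dict String (List String))
    (temp : List (String × List (String × List String))) : PySem.Dict String (List String) :=
  match PySem.List.pyGet? (PySem.Dict.mk temp).keys 0 with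
  | none => d  -- IndexError: ContaineridL[0] on an empty dict
  | some ContainerID =>
    match (PySem.Dict.mk temp).get? ContainerID with
    | none => d  -- unreachable: ContainerID is a key of temp
    | some value =>
      match (PySem.Dict.mk value).get? "WARN" with
      | none => d  -- KeyError: value['WARN']
      | some ErrL => ErrL.foldl (pvAErrStep SError ContainerID) d

-- A's middle loop: SPECIFIC_ERROR[SError] after the scan over range(Jsonlength)
def pvACollect (SError : String)
    (JsonRes : List (List (String × List (String × List String)))) :
    PySem.Dict String (List String) :=
  (PySem.List.pyRange 0 (PySem.List.len JsonRes)).foldl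
    (fun d i => pvAContainer SError d (PySem.List.pyGetD JsonRes i []))
    PySem.Dict.empty

def get_specific_warnings (JsonRes : List (List (String × List (String × List String)))) :
    List (List (String × List (String × List String))) :=
  pvKeywords.foldl
    (fun SPECIFIC_ERROR_L SError =>
      -- SPECIFIC_ERROR = {SError: {…}}; the 'not in' test compares singleton dicts, whose
      -- keys are the distinct keywords, so list equality coincides with Python's dict ==
      let SPECIFIC_ERROR : List (String × List (String × List String)) :=
        [(SError, (pvACollect SError JsonRes).items)]
      if SPECIFIC_ERROR_L.contains SPECIFIC_ERROR then SPECIFIC_ERROR_L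
      else SPECIFIC_ERROR_L ++ [SPECIFIC_ERROR])
    []

-- ===== PORT B =====
-- 'cid = next(iter(temp)); pairs.extend((cid, err) for err in temp[cid]["WARN"])';
-- the 'none'/[] arms are Python's StopIteration / KeyError, excluded by Pre_
def pvBPairs (temp : List (String × List (String × List String))) : List (String × String) :=
  match temp with
  | [] => []  -- next(iter(temp)) on an empty dict
  | (k0, _) :: _ =>
    match (PySem.Dict.mk temp).get? k0 with
    | none => []  -- unreachable: k0 is a key of temp
    | some value =>
      match (PySem.Dict.mk value).get? "WARN" with
      | none => []  -- KeyError: temp[cid]['WARN']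
      | some ErrL => ErrL.map (fun err => (k0, err))

def get_specific_warnings_alt (JsonRes : List (List (String × List (String × List String)))) :
    List (List (String × List (String × List String))) :=
  -- stage 1: flatten once
  let pairs := JsonRes.foldl (fun acc temp => acc ++ pvBPairs temp) []
  -- stage 2: per keyword filter / dedup keys / gather; the dict comprehension's keys
  -- (cids) are distinct, so its assoc list is exactly the map below
  pvKeywords.foldl
    (fun out kw =>
      let hits := pairs.filter (fun p => PySem.Str.isIn kw p.2)
      let cids := PySem.List.dedup (hits.map (fun p => p.1))
      out ++ [[(kw, cids.map (fun c =>
        (c, (hits.filter (fun p => p.1 == c)).map (fun p => p.2))))]])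
    []

-- ===== PRECONDITION & SPEC =====
-- Pre_ excludes exactly the inputs on which the Python A raises: a container that is an
-- empty dict (IndexError on ContaineridL[0]) or whose first entry's value has no 'WARN'
-- key (KeyError on value['WARN']); B raises on the same inputs.
def Pre_get_specific_warnings (JsonRes : List (List (String × List (String × List String)))) : Prop :=
  ∀ temp ∈ JsonRes, temp ≠ [] ∧ "WARN" ∈ (temp.headD ("", [])).2.map Prod.fst
instance (JsonRes : List (List (String × List (String × List String)))) : Decidable (Pre_get_specific_warnings JsonRes) := by unfold Pre_get_specific_warnings; infer_instance

def pvWitness_get_specific_warnings : (List (List (String × List (String × List String)))) :=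
  [[("c1", [("WARN", ["METASTORE_FILTER_HOOK will be ignored today"])])],
   [("c2", [("WARN", ["nothing"]), ("INFO", [])])]]

def Spec_get_specific_warnings (JsonRes : List (List (String × List (String × List String)))) (out : List (List (String × List (String × List String)))) : Prop := out = get_specific_warnings_alt JsonRes
instance (JsonRes : List (List (String × List (String × List String)))) (out : List (List (String × List (String × List String)))) : Decidable (Spec_get_specific_warnings JsonRes out) := by unfold Spec_get_specific_warnings; infer_instance

-- ===== CLAIM (what is proved, stated in full; the proofs are below) =====
def Claim_equal_get_specific_warnings : Prop := ∀ (JsonRes : List (List (String × List (String × List String)))), Dom_get_specific_warnings JsonRes → Pre_get_specific_warnings JsonRes → Spec_get_specific_warnings JsonRes (get_specific_warnings JsonRes)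

-- ===== LEMMAS AND PROOFS =====

-- A's 'if err matches' step over the flat (cid, err) pair
def pvStep (kw : String) (d : PySem.Dict String (List String)) (p : String × String) :
    PySem.Dict String (List String) :=
  if PySem.Str.isIn kw p.2 then d.modify p.1 [] (fun l => l ++ [p.2]) else d

-- A's append-or-create update is one Dict.modify
theorem pvAErrStep_eq (SError ContainerID : String)
    (d : PySem.Dict String (List String)) (err : String) :
    pvAErrStep SError ContainerID d err = pvStep SError d (ContainerID, err) := by
  unfold pvAErrStep pvStep PySem.Dict.modify
  split
  · split
    · rfl
    · rename_i hc
      rw [PySem.Dict.insert_insert_self,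
        PySem.Dict.getD_of_not_contains d [] (by simpa using hc)]
  · rfl

-- one container step of A is the pvStep fold over that container's flat pairs
theorem pvAContainer_eq (kw : String) (d : PySem.Dict String (List String))
    (temp : List (String × List (String × List String))) :
    pvAContainer kw d temp = (pvBPairs temp).foldl (pvStep kw) d := by
  match temp with
  | [] => rfl
  | (k0, v) :: rest =>
    unfold pvAContainer pvBPairs
    have h0 : PySem.List.pyGet? (PySem.Dict.mk ((k0, v) :: rest)).keys 0 = some k0 := by
      simp [PySem.Dict.keys, PySem.List.pyGet?, PySem.List.pyIdx?]
    rw [h0]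
    cases hv : (PySem.Dict.mk ((k0, v) :: rest)).get? k0 with
    | none => simp [hv]
    | some value =>
      cases hw : (PySem.Dict.mk value).get? "WARN" with
      | none => simp [hv, hw]
      | some ErrL =>
        simp only [hv, hw, List.foldl_map]
        apply PySem.List.foldl_congr_mem
        intro d e _
        exact pvAErrStep_eq kw k0 d e

-- A's container loop is the pvStep fold over the concatenated flat pairs
theorem foldl_containers (kw : String)
    (JsonRes : List (List (String × List (String × List String))))
    (d : PySem.Dict String (List String)) :
    JsonRes.foldl (pvAContainer kw) d =
      (JsonRes.flatMap pvBPairs).foldl (pvStep kw) d := by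
  induction JsonRes generalizing d with
  | nil => rfl
  | cons t ts ih =>
    simp only [List.foldl_cons, List.flatMap_cons, List.foldl_append]
    rw [pvAContainer_eq, ih]

-- A's middle loop is the pvStep fold over the whole flat pair stream
theorem pvACollect_eq (kw : String)
    (JsonRes : List (List (String × List (String × List String)))) :
    pvACollect kw JsonRes =
      (JsonRes.flatMap pvBPairs).foldl (pvStep kw) PySem.Dict.empty := by
  unfold pvACollect
  rw [PySem.List.foldl_pyRange_zero_pyGetD JsonRes [] (pvAContainer kw) PySem.Dict.empty]
  exact foldl_containers kw JsonRes PySem.Dict.empty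

-- the modify-append grouping fold's items are the dedup-keys / gather pipeline
theorem items_group_gen (hits : List (String × String)) :
    (hits.foldl (fun d p => d.modify p.1 [] (fun l => l ++ [p.2])) PySem.Dict.empty).items =
      (PySem.List.dedup (hits.map (fun p => p.1))).map
        (fun c => (c, (hits.filter (fun p => p.1 == c)).map (fun p => p.2))) := by
  have hnd : (hits.foldl (fun d p => d.modify p.1 [] (fun l => l ++ [p.2]))
      PySem.Dict.empty).keys.Nodup := by
    apply PySem.Dict.nodup_keys_foldl_modify_key
    exact PySem.Dict.nodup_keys_empty
  rw [PySem.Dict.items_eq_map_keys _ hnd [],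
      PySem.Dict.keys_foldl_modify_key]
  simp only [PySem.Dict.keys_empty, PySem.List.dedup_eq_ofList]
  apply List.map_congr_left
  intro c _
  rw [PySem.Dict.getD_foldl_modify_append]
  simp [PySem.Dict.getD_empty]

-- A's per-keyword dict's items are exactly B's filter / dedup-keys / gather pipeline
theorem pvAitems (kw : String)
    (JsonRes : List (List (String × List (String × List String)))) :
    (pvACollect kw JsonRes).items =
      (PySem.List.dedup (((JsonRes.flatMap pvBPairs).filter
          (fun p => PySem.Str.isIn kw p.2)).map (fun p => p.1))).map
        (fun c => (c, (((JsonRes.flatMap pvBPairs).filter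
          (fun p => PySem.Str.isIn kw p.2)).filter (fun p => p.1 == c)).map (fun p => p.2))) := by
  rw [pvACollect_eq]
  have h : pvStep kw = fun d (p : String × String) =>
      if PySem.Str.isIn kw p.2 then d.modify p.1 [] (fun l => l ++ [p.2]) else d := rfl
  rw [h, PySem.List.foldl_if_eq_foldl_filter]
  exact items_group_gen _

-- ===== VERDICT (by name: the statement is the Claim_ definition above) =====
theorem get_specific_warnings_spec : Claim_equal_get_specific_warnings := by
  intro JsonRes _ _
  unfold Spec_get_specific_warnings get_specific_warnings get_specific_warnings_alt
  simp only [pvKeywords, List.foldl_cons, List.foldl_nil,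
    PySem.List.foldl_append_eq_flatMap, List.nil_append]
  rw [pvAitems, pvAitems, pvAitems]
  simp [Prod.ext_iff]
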